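-- pv_equiv track=rewrite | github.com/abhishekparve/Leet-Code | Recursion/90_subsets_2.py | subset2
-- ===== SOURCE A (Python) =====
-- def subset2(nums):
--     result = []
--     subset = []
--     # Sorting the list to ensure that the duplicate values are next to each other
--     nums.sort()
--
--     def generateSubset(index, subset):
--         if index == len(nums):
--             result.append(subset.copy())
--             return
--
--         # Decision 1: Adding a value to the subset and futher going down along that path
--         subset.append(nums[index])
--         generateSubset(index + 1, subset)
--
--         # Decision 2: Pop out the value that we had added in decision 1
--         subset.pop()
--
--         # Incrementing the index if we identify that the value at curr index in nums
--         # is equal to its next index. We keep on incrementing the index until the value at curr index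
--         # and its next index are not equal
--         while index + 1 < len(nums) and nums[index] == nums[index + 1]:
--             index += 1
--
--         # Pass subset as an empty value and further going down along that path
--         generateSubset(index + 1, subset)
--
--     generateSubset(0, subset)
--     return result
-- ===== SOURCE B (Python) =====
-- def subset2(nums):
--     nums.sort()
--
--     def build(rest):
--         # rest is a (sorted) suffix; return all distinct subsets of it, in A's order
--         if not rest:
--             return [[]]
--         v = rest[0]
--         c = 1
--         while c < len(rest) and rest[c] == v:
--             c += 1
--         tails = build(rest[c:])
--         return [[v] * k + t for k in reversed(range(c + 1)) for t in tails]
--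
--     return build(nums)
-- ===== Notes on version B (the rewrite author's own statement) =====
-- stated objective: alternative
-- what changed: Replaces A's per-element include/exclude backtracking DFS (mutating a shared subset list and skipping duplicate indices) with a recursion over runs of equal values in the sorted list that emits, for each run of length c, the counts c down to 0 prefixed onto the subsets of the remaining suffix.
import Mathlib
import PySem

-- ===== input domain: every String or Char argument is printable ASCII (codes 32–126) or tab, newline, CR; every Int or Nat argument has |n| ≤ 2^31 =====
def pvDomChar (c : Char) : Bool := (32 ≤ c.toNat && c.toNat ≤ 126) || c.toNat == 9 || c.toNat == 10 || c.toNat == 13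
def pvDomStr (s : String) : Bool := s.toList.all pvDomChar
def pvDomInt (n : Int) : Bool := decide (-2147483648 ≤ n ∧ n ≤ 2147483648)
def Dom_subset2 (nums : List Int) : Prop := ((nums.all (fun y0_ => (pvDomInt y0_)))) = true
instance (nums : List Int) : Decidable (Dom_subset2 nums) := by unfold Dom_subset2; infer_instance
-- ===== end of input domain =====

-- B replaces A's per-element include/exclude DFS (with subset mutation) by a recursion over
-- runs of equal values that emits each run count from c down to 0; same return value, same
-- in-place sort side effect on the caller's list in both Pythons (return value is what is proved).

-- ===== PORT A =====
-- the inner 'while index + 1 < len(nums) and nums[index] == nums[index + 1]: index += 1'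
def subset2Skip (nums : List Int) (index : Nat) : Nat :=
  if index + 1 < nums.length ∧ PySem.List.pyGet? nums (index : Int) = PySem.List.pyGet? nums ((index : Int) + 1) then
    subset2Skip nums (index + 1)
  else index
termination_by nums.length - index

-- lemma the port needs for termination of subset2Gen
theorem subset2Skip_ge (nums : List Int) (index : Nat) : index ≤ subset2Skip nums index := by
  unfold subset2Skip
  by_cases h : index + 1 < nums.length ∧
      PySem.List.pyGet? nums (index : Int) = PySem.List.pyGet? nums ((index : Int) + 1)
  · rw [if_pos h]
    have := subset2Skip_ge nums (index + 1)
    omega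
  · rw [if_neg h]
termination_by nums.length - index
decreasing_by obtain ⟨h1, -⟩ := h; omega

-- generateSubset; the mutable 'result'/'subset' are threaded as accumulators: result is the
-- list appended so far, subset the current prefix ('pop' = reusing the old subset value).
-- Python tests 'index == len(nums)'; index never exceeds len(nums), the '≥' is a totality guard.
def subset2Gen (nums : List Int) (index : Nat) (subset : List Int) (result : List (List Int)) : List (List Int) :=
  if h : nums.length ≤ index then result ++ [subset]
  else
    let x := (PySem.List.pyGet? nums (index : Int)).getD 0
    let r1 := subset2Gen nums (index + 1) (subset ++ [x]) result
    subset2Gen nums (subset2Skip nums index + 1) subset r1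
termination_by nums.length - index
decreasing_by
  · omega
  · have := subset2Skip_ge nums index; omega

def subset2 (nums : List Int) : List (List Int) :=
  subset2Gen (PySem.List.sorted nums (fun x => x) false) 0 [] []

-- ===== PORT B =====
-- build(rest): the counting while-loop 'c = 1; while c < len(rest) and rest[c] == v: c += 1'
-- computes c = 1 + length of the leading run of v in rest[1:] (exact); rest[c:] = xs.drop t.
def subset2Build (l : List Int) : List (List Int) :=
  match l with
  | [] => [[]]
  | v :: xs =>
    let t := (xs.takeWhile (fun y => y == v)).length
    let tails := subset2Build (xs.drop t)
    (List.range (1 + t + 1)).reverse.flatMap fun k => tails.map fun tl => List.replicate k v ++ tl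
termination_by l.length
decreasing_by simp

def subset2_alt (nums : List Int) : List (List Int) :=
  subset2Build (PySem.List.sorted nums (fun x => x) false)

-- ===== PRECONDITION & SPEC =====
def Spec_subset2 (nums : List Int) (out : List (List Int)) : Prop := out = subset2_alt nums
instance (nums : List Int) (out : List (List Int)) : Decidable (Spec_subset2 nums out) := by unfold Spec_subset2; infer_instance

-- ===== CLAIM (what is proved, stated in full; the proofs are below) =====
def Claim_equal_subset2 : Prop := ∀ (nums : List Int), Dom_subset2 nums → Spec_subset2 nums (subset2 nums)

-- ===== LEMMAS AND PROOFS =====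

-- the list of completions that A's recursion from a suffix produces, as a structural recursion
def pvComp (l : List Int) : List (List Int) :=
  match l with
  | [] => [[]]
  | v :: xs =>
    (pvComp xs).map (fun c => v :: c) ++ pvComp (xs.dropWhile (fun y => y == v))
termination_by l.length
decreasing_by
  · simp
  · simp; have := List.length_dropWhile_le (fun y => y == v) xs; omega

theorem pvComp_cons (v : Int) (xs : List Int) :
    pvComp (v :: xs)
      = (pvComp xs).map (fun c => v :: c) ++ pvComp (xs.dropWhile (fun y => y == v)) := by
  rw [pvComp]

theorem pvSkip_drop (nums : List Int) (index : Nat) (v : Int) (xs : List Int)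
    (h : nums.drop index = v :: xs) :
    nums.drop (subset2Skip nums index + 1) = xs.dropWhile (fun y => y == v) := by
  induction xs generalizing index v with
  | nil =>
    have hlen : index + 1 = nums.length := by
      have := congrArg List.length h; simp at this; omega
    unfold subset2Skip
    rw [if_neg (by omega)]
    rw [hlen, List.drop_length, List.dropWhile_nil]
  | cons w ws ih =>
    have hlt : index < nums.length := by
      have := congrArg List.length h; simp at this; omega
    have hget : nums[index]? = some v := by
      rw [← List.head?_drop, h]; rfl
    have hget1 : nums[index+1]? = some w := by
      rw [← List.head?_drop, show nums.drop (index+1) = w :: ws by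
        rw [← List.drop_drop, h]; rfl]
      rfl
    have hdrop1 : nums.drop (index + 1) = w :: ws := by
      rw [← List.drop_drop, h]; rfl
    by_cases hw : w = v
    · unfold subset2Skip
      rw [if_pos]
      · have := ih (index + 1) v (by rw [hdrop1, hw])
        rw [this]
        rw [List.dropWhile_cons_of_pos (by simp [hw])]
      · constructor
        · have := congrArg List.length hdrop1; simp at this; omega
        · rw [PySem.List.pyGet?_natCast, show ((index : Int) + 1) = ((index + 1 : Nat) : Int) by push_cast; ring,
              PySem.List.pyGet?_natCast, hget, hget1, hw]
    · unfold subset2Skip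
      rw [if_neg]
      · rw [hdrop1, List.dropWhile_cons_of_neg (by simp [hw])]
      · intro ⟨h1, h2⟩
        rw [PySem.List.pyGet?_natCast, show ((index : Int) + 1) = ((index + 1 : Nat) : Int) by push_cast; ring,
            PySem.List.pyGet?_natCast, hget, hget1] at h2
        exact hw (Option.some.inj h2).symm

theorem pvGen_eq (nums : List Int) :
    ∀ (k index : Nat) (subset : List Int) (result : List (List Int)),
      nums.length - index ≤ k →
      subset2Gen nums index subset result
        = result ++ (pvComp (nums.drop index)).map (fun c => subset ++ c) := by
  intro k
  induction k with
  | zero =>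
    intro index subset result hk
    have hge : nums.length ≤ index := by omega
    unfold subset2Gen
    rw [dif_pos hge, List.drop_eq_nil_of_le hge]
    simp [pvComp]
  | succ k ih =>
    intro index subset result hk
    by_cases hge : nums.length ≤ index
    · unfold subset2Gen
      rw [dif_pos hge, List.drop_eq_nil_of_le hge]
      simp [pvComp]
    · have hlt : index < nums.length := by omega
      have hdrop : nums.drop index = nums[index] :: nums.drop (index + 1) :=
        List.drop_eq_getElem_cons hlt
      have hget : (PySem.List.pyGet? nums (index : Int)).getD 0 = nums[index] := by
        rw [PySem.List.pyGet?_natCast, List.getElem?_eq_getElem hlt]; rfl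
      unfold subset2Gen
      rw [dif_neg hge]
      show subset2Gen nums (subset2Skip nums index + 1) subset
            (subset2Gen nums (index + 1)
              (subset ++ [(PySem.List.pyGet? nums (index : Int)).getD 0]) result) = _
      rw [ih (index + 1) _ _ (by omega)]
      rw [ih (subset2Skip nums index + 1) _ _
        (by have := subset2Skip_ge nums index; omega)]
      rw [pvSkip_drop nums index nums[index] (nums.drop (index+1)) hdrop]
      rw [hdrop, pvComp_cons]
      simp [List.getElem?_eq_getElem hlt, List.map_map, Function.comp, List.append_assoc]

-- dropping a run of v's, then while-v
theorem pvDropWhile_replicate_append (v : Int) (t : Nat) (ys : List Int)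
    (hys : ys.dropWhile (fun y => y == v) = ys) :
    (List.replicate t v ++ ys).dropWhile (fun y => y == v) = ys := by
  induction t with
  | zero => simpa using hys
  | succ t ih => simpa [List.replicate_succ, List.dropWhile_cons_of_pos] using ih

-- pvComp over a run of t copies of v followed by a run-free tail
theorem pvComp_run (v : Int) (t : Nat) (ys : List Int)
    (hys : ys.dropWhile (fun y => y == v) = ys) :
    pvComp (List.replicate t v ++ ys)
      = (List.range (t + 1)).reverse.flatMap
          (fun k => (pvComp ys).map fun tl => List.replicate k v ++ tl) := by
  induction t with
  | zero => simp
  | succ t ih =>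
    rw [List.replicate_succ, List.cons_append, pvComp_cons,
        pvDropWhile_replicate_append v t ys hys]
    rw [List.range_succ_eq_map, List.reverse_cons, ih]
    simp only [List.flatMap_append, List.map_flatMap, List.flatMap_singleton,
      List.replicate_zero, List.nil_append, List.map_id', List.map_map,
      ← List.map_reverse, List.flatMap_map]
    simp only [List.replicate_succ]
    rfl

theorem pvBuild_eq_comp (l : List Int) : subset2Build l = pvComp l := by
  cases l with
  | nil => rw [subset2Build, pvComp]
  | cons v xs =>
    have ih := pvBuild_eq_comp (xs.drop ((xs.takeWhile (fun y => y == v)).length))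
    set t := (xs.takeWhile (fun y => y == v)).length with ht
    have htake : xs.takeWhile (fun y => y == v) = List.replicate t v := by
      rw [List.eq_replicate_iff]
      refine ⟨rfl, fun b hb => ?_⟩
      have := List.mem_takeWhile_imp hb
      simpa using this
    have hsplit : xs = List.replicate t v ++ xs.dropWhile (fun y => y == v) := by
      conv_lhs => rw [← List.takeWhile_append_dropWhile (p := fun y => y == v) (l := xs)]
      rw [htake]
    have hidem : (xs.dropWhile (fun y => y == v)).dropWhile (fun y => y == v)
        = xs.dropWhile (fun y => y == v) := List.dropWhile_idempotent _ _
    have hdropt : xs.drop t = xs.dropWhile (fun y => y == v) := by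
      conv_lhs => rw [hsplit]
      exact List.drop_left' (by simp)
    rw [show subset2Build (v :: xs)
          = (List.range (1 + t + 1)).reverse.flatMap
              (fun k => (subset2Build (xs.drop t)).map fun tl => List.replicate k v ++ tl)
        from by rw [subset2Build]]
    rw [ih, hdropt]
    have hrun := pvComp_run v (t + 1) (xs.dropWhile (fun y => y == v)) hidem
    rw [List.replicate_succ, List.cons_append, ← hsplit] at hrun
    rw [show 1 + t + 1 = t + 1 + 1 by omega, hrun]
termination_by l.length
decreasing_by simp

-- ===== VERDICT (by name: the statement is the Claim_ definition above) =====
theorem subset2_spec : Claim_equal_subset2 := by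
  intro nums _
  unfold Spec_subset2 subset2 subset2_alt
  rw [pvGen_eq _ (PySem.List.sorted nums (fun x => x) false).length 0 [] [] (by omega)]
  rw [pvBuild_eq_comp]
  simp
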